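-- pv_equiv track=rewrite | github.com/MustafaMansoor/leetcode | codewar.py | morganAndString
-- ===== SOURCE A (Python) =====
-- def morganAndString(a, b):
--     # Write your code here
--     a += 'z'
--     b += 'z'
--     res = ''
--     i = 0
--     j = 0
--     while i < len(a) and j < len(b):
--         if a[i:] < b[j:]:
--             res += a[i]
--             i += 1
--         else:
--             res += b[j]
--             j += 1
--     return res[0:-1]
-- ===== SOURCE B (Python) =====
-- def morganAndString(a, b):
--     # Dynamic-programming tabulation: precompute less[i][j] = (s[i:] < t[j:])
--     # for the sentinel-extended strings in one bottom-up pass, then do a linear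
--     # merge using O(1) table lookups instead of comparing fresh suffix slices.
--     # Each row i satisfies row[j] = (s[i] < t[j]) or (s[i] == t[j] and nxt[j+1]);
--     # it is materialised by copying a per-character 'strictly less' byte row and
--     # patching only the positions where t[j] == s[i].
--     s = a + 'z'
--     t = b + 'z'
--     n, m = len(s), len(t)
--     lt = {}
--     eqpos = {}
--     for c in set(s):
--         lt[c] = bytes(1 if c < d else 0 for d in t)
--         eqpos[c] = [j for j in range(m) if t[j] == c]
--     # base row for i = n: s[n:] == '' is smaller than t[j:] iff t[j:] is non-empty
--     rows = [bytes([1] * m + [0])]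
--     for i in range(n - 1, -1, -1):
--         c = s[i]
--         row = bytearray(lt[c])
--         row.append(0)
--         nx = rows[-1]
--         for j in eqpos[c]:
--             row[j] = nx[j + 1]
--         rows.append(bytes(row))
--     rows.reverse()
--     res = []
--     i = 0
--     j = 0
--     while i < n and j < m:
--         if rows[i][j]:
--             res.append(s[i])
--             i += 1
--         else:
--             res.append(t[j])
--             j += 1
--     return ''.join(res)[:-1]
-- ===== Notes on version B (the rewrite author's own statement) =====
-- stated objective: alternative
-- what changed: Replaces A's per-step construction and lexicographic comparison of two fresh suffix slices by a dynamic-programming tabulation: one bottom-up pass fills a table less[i][j] = (s[i:] < t[j:]) over the sentinel-extended strings (each row a copied per-character byte row patched at equal-character positions), and the merge then runs with O(1) table lookups per emitted character.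
import Mathlib
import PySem

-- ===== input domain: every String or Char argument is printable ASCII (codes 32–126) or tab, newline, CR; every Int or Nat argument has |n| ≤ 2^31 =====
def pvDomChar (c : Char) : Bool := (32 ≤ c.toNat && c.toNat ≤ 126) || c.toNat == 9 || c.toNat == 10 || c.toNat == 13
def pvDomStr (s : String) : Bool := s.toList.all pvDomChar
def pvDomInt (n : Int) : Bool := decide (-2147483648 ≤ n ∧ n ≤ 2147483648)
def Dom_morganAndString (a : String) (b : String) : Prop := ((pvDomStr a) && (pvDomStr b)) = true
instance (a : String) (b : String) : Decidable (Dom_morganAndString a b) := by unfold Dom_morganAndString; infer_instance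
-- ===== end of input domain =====

-- B replaces A's per-step suffix-slice comparisons by a DP table less[i][j] =
-- (s[i:] < t[j:]) built in one bottom-up pass, then merges with O(1) lookups;
-- objective: alternative (not measured faster).

-- ===== PORT A =====
-- A's while loop: res accumulator, indices i j into s = a+'z', t = b+'z';
-- 'a[i:] < b[j:]' is Python string < = Lean's < on List Char, the slice a[i:]
-- for 0 ≤ i is List.drop i (PySem.List.slice_from_natCast).
def morganLoopA (s t : List Char) (res : List Char) (i j : Nat) : List Char :=
  if h : i < s.length ∧ j < t.length then
    if s.drop i < t.drop j then
      morganLoopA s t (res ++ [s[i]]) (i + 1) j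
    else
      morganLoopA s t (res ++ [t[j]]) i (j + 1)
  else res
termination_by (s.length - i) + (t.length - j)
decreasing_by all_goals omega

def morganAndString (a : String) (b : String) : String :=
  -- s = a + 'z', t = b + 'z'; final res[0:-1] is dropLast (PySem.List.slice_to_neg_one)
  String.ofList ((morganLoopA (a.toList ++ ['z']) (b.toList ++ ['z']) [] 0 0).dropLast)

-- ===== PORT B =====
-- Source B's row build: given c = s[i] and the tail row nxt (row i+1), the copied
-- per-character 'strictly less' byte row patched at positions with t[j] == c is
-- pointwise (nxt[j+1] if t[j] == c else c < t[j]), followed by the final 0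
def mkRow (c : Char) : List Char → List Bool → List Bool
  | [], _ => [false]
  | d :: t', nxt => (if c == d then nxt.tail.headD false else decide (c < d)) :: mkRow c t' nxt.tail

-- Source B's bottom-up build of rows (appended then reversed = this prepending
-- recursion over s): row for i = n is the base row, row i from row i+1.
def mkTable (t : List Char) : List Char → List (List Bool)
  | [] => [List.replicate t.length true ++ [false]]
  | c :: s' => mkRow c t ((mkTable t s').headD []) :: mkTable t s'

-- Source B's merge loop: same indices, decision by table lookup rows[i][j]
def morganLoopB (s t : List Char) (tbl : List (List Bool)) (res : List Char) (i j : Nat) : List Char :=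
  if h : i < s.length ∧ j < t.length then
    if (tbl.getD i []).getD j false then
      morganLoopB s t tbl (res ++ [s[i]]) (i + 1) j
    else
      morganLoopB s t tbl (res ++ [t[j]]) i (j + 1)
  else res
termination_by (s.length - i) + (t.length - j)
decreasing_by all_goals omega

def morganAndString_alt (a : String) (b : String) : String :=
  let s := a.toList ++ ['z']
  let t := b.toList ++ ['z']
  String.ofList ((morganLoopB s t (mkTable t s) [] 0 0).dropLast)  -- ''.join(res)[:-1]

-- ===== PRECONDITION & SPEC =====
def Spec_morganAndString (a : String) (b : String) (out : String) : Prop := out = morganAndString_alt a b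
instance (a : String) (b : String) (out : String) : Decidable (Spec_morganAndString a b out) := by unfold Spec_morganAndString; infer_instance

-- ===== CLAIM (what is proved, stated in full; the proofs are below) =====
def Claim_equal_morganAndString : Prop := ∀ (a : String) (b : String), Dom_morganAndString a b → Spec_morganAndString a b (morganAndString a b)

-- ===== LEMMAS AND PROOFS =====

theorem getD_tail {α : Type} (l : List α) (j : Nat) (d : α) :
    l.tail.getD j d = l.getD (j + 1) d := by
  cases l <;> simp [List.getD]

theorem headD_eq_getD_zero {α : Type} (l : List α) (d : α) :
    l.headD d = l.getD 0 d := by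
  cases l <;> simp [List.getD]

-- the row comprehension computes suffix comparisons, one character deeper
theorem mkRow_spec (c : Char) (s' : List Char) :
    ∀ (t : List Char) (nxt : List Bool),
    (∀ j, nxt.getD j false = decide (s' < t.drop j)) →
    ∀ j, (mkRow c t nxt).getD j false = decide ((c :: s') < t.drop j) := by
  intro t
  induction t with
  | nil =>
    intro nxt _ j
    cases j <;> simp [mkRow, List.getD]
  | cons d t' ih =>
    intro nxt hnxt j
    have htail : ∀ j, nxt.tail.getD j false = decide (s' < t'.drop j) := by
      intro j
      rw [getD_tail]
      simpa using hnxt (j + 1)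
    cases j with
    | zero =>
      have h1 : nxt.tail.headD false = decide (s' < t') := by
        rw [headD_eq_getD_zero]
        simpa using htail 0
      simp only [mkRow, List.getD, List.drop_zero, List.getElem?_cons_zero, Option.getD_some]
      rw [h1]
      by_cases heq : c = d
      · subst heq
        by_cases h2 : s' < t' <;> simp [h2]
      · have hne : (c == d) = false := by simp [heq]
        by_cases hlt : c < d <;> simp [hne, hlt, List.cons_lt_cons_iff, heq]
    | succ j =>
      simp only [mkRow, List.getD, List.getElem?_cons_succ, List.drop_succ_cons]
      exact ih nxt.tail htail j

-- the base row: '' < t[j:] exactly when j < t.length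
theorem baseRow_spec (t : List Char) :
    ∀ j, (List.replicate t.length true ++ [false]).getD j false
      = decide (([] : List Char) < t.drop j) := by
  intro j
  rcases lt_trichotomy j t.length with hj | hj | hj
  · have hdrop : t.drop j ≠ [] := by
      intro h
      have := List.drop_eq_nil_iff.mp h
      omega
    obtain ⟨x, xs, hx⟩ := List.exists_cons_of_ne_nil hdrop
    rw [hx, List.getD, List.getElem?_append_left (by simpa using hj)]
    simp [hj, List.nil_lt_cons]
  · subst hj
    rw [List.drop_eq_nil_iff.mpr (le_refl _), List.getD,
      List.getElem?_append_right (by simp)]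
    simp
  · rw [List.drop_eq_nil_iff.mpr (by omega), List.getD,
      List.getElem?_eq_none (by simp; omega)]
    simp

-- the whole table tabulates the suffix comparisons s[i:] < t[j:]
theorem mkTable_spec (t : List Char) :
    ∀ (s : List Char) (i : Nat), i ≤ s.length →
    ∀ j, ((mkTable t s).getD i []).getD j false = decide (s.drop i < t.drop j) := by
  intro s
  induction s with
  | nil =>
    intro i hi j
    cases i with
    | zero => simpa [mkTable, List.getD] using baseRow_spec t j
    | succ n => simp at hi
  | cons c s' ih =>
    intro i hi j
    cases i with
    | zero =>
      have hhead : ∀ j, ((mkTable t s').headD []).getD j false = decide (s' < t.drop j) := by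
        intro j
        rw [headD_eq_getD_zero]
        simpa using ih 0 (by omega) j
      simp only [mkTable, List.getD, List.getElem?_cons_zero, Option.getD_some, List.drop_zero]
      exact mkRow_spec c s' t ((mkTable t s').headD []) hhead j
    | succ i =>
      simp only [mkTable, List.getD, List.getElem?_cons_succ, List.drop_succ_cons]
      exact ih i (by simpa using hi) j

-- the two merge loops agree, because the table holds exactly A's comparisons
theorem loop_eq (s t : List Char) (tbl : List (List Bool))
    (hspec : ∀ i j, i ≤ s.length →
      (tbl.getD i []).getD j false = decide (s.drop i < t.drop j)) :
    ∀ (res : List Char) (i j : Nat),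
      morganLoopA s t res i j = morganLoopB s t tbl res i j := by
  intro res i j
  induction res, i, j using morganLoopA.induct s t with
  | case1 res i j h hlt ih =>
    rw [morganLoopA, morganLoopB, dif_pos h, dif_pos h, if_pos hlt,
      if_pos (by rw [hspec i j (by omega)]; simpa using hlt)]
    exact ih
  | case2 res i j h hlt ih =>
    rw [morganLoopA, morganLoopB, dif_pos h, dif_pos h, if_neg hlt,
      if_neg (by rw [hspec i j (by omega)]; simpa using hlt)]
    exact ih
  | case3 res i j h =>
    rw [morganLoopA, morganLoopB, dif_neg h, dif_neg h]

-- ===== VERDICT (by name: the statement is the Claim_ definition above) =====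
theorem morganAndString_spec : Claim_equal_morganAndString := by
  intro a b _
  unfold Spec_morganAndString morganAndString morganAndString_alt
  rw [loop_eq (a.toList ++ ['z']) (b.toList ++ ['z'])
    (mkTable (b.toList ++ ['z']) (a.toList ++ ['z']))
    (fun i j hi => mkTable_spec (b.toList ++ ['z']) (a.toList ++ ['z']) i hi j)]
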